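-- pv_equiv track=rewrite | github.com/lukasPisarcik/tagusScript | main.py | diagonal_traverse_lsb
-- ===== SOURCE A (Python) =====
-- def extract_nth_bit_from_rgb(rgb_value, n):
--     r_nth_bit = (rgb_value[0] >> (n - 1)) & 1
--     g_nth_bit = (rgb_value[1] >> (n - 1)) & 1
--     b_nth_bit = (rgb_value[2] >> (n - 1)) & 1
--
--     # next bit
--     # r1_nth_bit = (rgb_value[0] >> (n)) & 1
--     # g1_nth_bit = (rgb_value[1] >> (n)) & 1
--     # b1_nth_bit = (rgb_value[2] >> (n)) & 1
--
--     # next bit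
--     # r2_nth_bit = (rgb_value[0] >> (n + 1)) & 1
--     # g2_nth_bit = (rgb_value[1] >> (n + 1)) & 1
--     # b2_nth_bit = (rgb_value[2] >> (n + 1)) & 1
--
--     return [r_nth_bit, g_nth_bit, b_nth_bit]
--
-- def diagonal_traverse_lsb(matrix):
--     rows = len(matrix)
--     cols = len(matrix[0])
--
--     bits = []
--
--     for d in range(rows + cols - 1):
--         if d < cols:
--             row = 0
--             col = d
--         else:
--             row = d - cols + 1
--             col = cols - 1
--
--         diagonal = []
--         while row < rows and col >= 0:
--             lsb_values = extract_nth_bit_from_rgb(matrix[row][col], 1)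
--             diagonal.extend(lsb_values)
--             row += 1
--             col -= 1
--
--         if d % 2 == 0:
--             bits.extend(diagonal)
--         else:
--             bits.extend(diagonal[::-1])
--
--     return bits
-- ===== SOURCE B (Python) =====
-- def diagonal_traverse_lsb(matrix):
--     rows = len(matrix)
--     cols = len(matrix[0])
--
--     # scatter every cell's three LSBs into its diagonal bucket in one row-major pass
--     diagonals = [[] for _ in range(rows + cols - 1)]
--     for r in range(rows):
--         for c in range(cols):
--             px = matrix[r][c]
--             diagonals[r + c].extend((px[0] & 1, px[1] & 1, px[2] & 1))
--
--     bits = []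
--     for d, bucket in enumerate(diagonals):
--         bits.extend(bucket if d % 2 == 0 else bucket[::-1])
--     return bits
-- ===== Notes on version B (the rewrite author's own statement) =====
-- stated objective: alternative
-- what changed: Instead of walking each anti-diagonal from a computed start cell with a while loop, B scatters every cell's three LSBs into diagonal buckets in one row-major double pass and then concatenates the buckets, reversing the odd-indexed ones.
import Mathlib
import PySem

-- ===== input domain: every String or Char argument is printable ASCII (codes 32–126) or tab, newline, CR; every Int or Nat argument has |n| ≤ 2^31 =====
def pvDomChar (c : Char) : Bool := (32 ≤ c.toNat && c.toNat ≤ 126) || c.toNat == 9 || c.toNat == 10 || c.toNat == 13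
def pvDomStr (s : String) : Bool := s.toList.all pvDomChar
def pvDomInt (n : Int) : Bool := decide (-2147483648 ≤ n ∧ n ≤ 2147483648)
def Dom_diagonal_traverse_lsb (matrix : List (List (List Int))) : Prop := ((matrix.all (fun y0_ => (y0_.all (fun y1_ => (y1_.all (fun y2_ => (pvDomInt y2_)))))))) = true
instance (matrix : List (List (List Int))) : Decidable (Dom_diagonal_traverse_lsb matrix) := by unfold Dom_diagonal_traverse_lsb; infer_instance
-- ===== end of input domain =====

-- B replaces A's per-diagonal while-loop walk by a single row-major scatter into
-- diagonal buckets followed by a concatenation pass (objective: alternative decomposition).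

-- ===== PORT A =====
-- (rgb_value[i] >> (n-1)) & 1; the shift amount is ported as (n-1).toNat, exact for
-- n ≥ 1 (the only call in this file passes n = 1); out-of-range indexing (excluded by
-- Pre_) is padded with a default, where Python raises IndexError.
def extract_nth_bit_from_rgb (rgb_value : List Int) (n : Int) : List Int :=
  let r_nth_bit := PySem.Int.band (PySem.List.pyGetD rgb_value 0 0 >>> (n - 1).toNat) 1
  let g_nth_bit := PySem.Int.band (PySem.List.pyGetD rgb_value 1 0 >>> (n - 1).toNat) 1
  let b_nth_bit := PySem.Int.band (PySem.List.pyGetD rgb_value 2 0 >>> (n - 1).toNat) 1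
  [r_nth_bit, g_nth_bit, b_nth_bit]

-- the inner 'while row < rows and col >= 0' loop of A
def pvWalkA (matrix : List (List (List Int))) (rows row col : Int) (acc : List Int) : List Int :=
  if _h : row < rows ∧ 0 ≤ col then
    pvWalkA matrix rows (row + 1) (col - 1)
      (acc ++ extract_nth_bit_from_rgb (PySem.List.pyGetD (PySem.List.pyGetD matrix row []) col []) 1)
  else acc
termination_by (rows - row).toNat
decreasing_by omega

def diagonal_traverse_lsb (matrix : List (List (List Int))) : List Int :=
  let rows : Int := matrix.length
  let cols : Int := (PySem.List.pyGetD matrix 0 []).length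
  (PySem.List.pyRange 0 (rows + cols - 1) 1).foldl
    (fun bits d =>
      let rc : Int × Int := if d < cols then (0, d) else (d - cols + 1, cols - 1)
      let diagonal := pvWalkA matrix rows rc.1 rc.2 []
      if PySem.Int.mod d 2 = 0 then bits ++ diagonal else bits ++ diagonal.reverse)
    []

-- ===== PORT B =====
-- (px[0] & 1, px[1] & 1, px[2] & 1) of Source B
def pvCellBits (px : List Int) : List Int :=
  [PySem.Int.band (PySem.List.pyGetD px 0 0) 1,
   PySem.Int.band (PySem.List.pyGetD px 1 0) 1,
   PySem.Int.band (PySem.List.pyGetD px 2 0) 1]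

def diagonal_traverse_lsb_alt (matrix : List (List (List Int))) : List Int :=
  let rows := matrix.length
  let cols := (PySem.List.pyGetD matrix 0 []).length
  let diagonals : List (List Int) :=
    (List.range rows).foldl
      (fun ds r =>
        (List.range cols).foldl
          (fun ds c =>
            ds.set (r + c)
              (ds.getD (r + c) [] ++
                pvCellBits (PySem.List.pyGetD (PySem.List.pyGetD matrix (r : Int) []) (c : Int) [])))
          ds)
      (List.replicate (rows + cols - 1) [])
  (PySem.List.enumerate diagonals).foldl
    (fun bits db => bits ++ (if PySem.Int.mod db.1 2 = 0 then db.2 else db.2.reverse)) []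

-- ===== PRECONDITION & SPEC =====
-- Pre_ excludes exactly the inputs where Python A raises IndexError: the empty matrix,
-- rows shorter than the first row, and an accessed pixel with fewer than 3 channels.
def Pre_diagonal_traverse_lsb (matrix : List (List (List Int))) : Prop :=
  matrix ≠ [] ∧
    ∀ row ∈ matrix, (matrix.headD []).length ≤ row.length ∧
      ∀ cell ∈ row.take (matrix.headD []).length, 3 ≤ cell.length
instance (matrix : List (List (List Int))) : Decidable (Pre_diagonal_traverse_lsb matrix) := by
  unfold Pre_diagonal_traverse_lsb; infer_instance

def pvWitness_diagonal_traverse_lsb : List (List (List Int)) :=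
  [[[1, 2, 3], [4, 5, 6]], [[7, 0, 1], [2, 3, 4]]]

def Spec_diagonal_traverse_lsb (matrix : List (List (List Int))) (out : List Int) : Prop := out = diagonal_traverse_lsb_alt matrix
instance (matrix : List (List (List Int))) (out : List Int) : Decidable (Spec_diagonal_traverse_lsb matrix out) := by unfold Spec_diagonal_traverse_lsb; infer_instance

-- ===== CLAIM (what is proved, stated in full; the proofs are below) =====
def Claim_equal_diagonal_traverse_lsb : Prop := ∀ (matrix : List (List (List Int))), Dom_diagonal_traverse_lsb matrix → Pre_diagonal_traverse_lsb matrix → Spec_diagonal_traverse_lsb matrix (diagonal_traverse_lsb matrix)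

-- ===== LEMMAS AND PROOFS =====

-- the three low bits of the pixel at (r, c), shared normal form of both ports
def pvCell (M : List (List (List Int))) (r c : Nat) : List Int :=
  pvCellBits (PySem.List.pyGetD (PySem.List.pyGetD M (r : Int) []) (c : Int) [])

-- contents of diagonal bucket d after the first rLim rows have been scattered
def pvDiag (M : List (List (List Int))) (cols d rLim : Nat) : List Int :=
  (List.range' (d + 1 - cols) (min rLim (d + 1) - (d + 1 - cols))).flatMap
    (fun r => pvCell M r (d - r))

theorem extract_one_eq_cellBits (px : List Int) :
    extract_nth_bit_from_rgb px 1 = pvCellBits px := by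
  simp [extract_nth_bit_from_rgb, pvCellBits]

theorem pvWalkA_eq (M : List (List (List Int))) (d : Nat) :
    ∀ (m k : Nat) (acc : List Int), m = min M.length (d + 1) - k →
      pvWalkA M (M.length : Int) (k : Int) ((d : Int) - (k : Int)) acc =
        acc ++ (List.range' k m).flatMap (fun r => pvCell M r (d - r)) := by
  intro m
  induction m with
  | zero =>
    intro k acc hm
    rw [pvWalkA, dif_neg (by omega)]
    simp
  | succ m ih =>
    intro k acc hm
    rw [pvWalkA]
    rw [dif_pos (by constructor <;> omega)]
    have h1 : ((k : Int) + 1) = ((k + 1 : Nat) : Int) := by push_cast; ring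
    have h2 : ((d : Int) - (k : Int) - 1) = ((d : Int) - ((k + 1 : Nat) : Int)) := by push_cast; ring
    rw [h1, h2, ih (k + 1) _ (by omega)]
    have hc : ((d : Int) - (k : Int)) = ((d - k : Nat) : Int) := by omega
    rw [hc]
    simp [List.range'_succ, extract_one_eq_cellBits, pvCell, PySem.List.pyGetD_natCast]

-- setting index i of a range-map to (old value ++ X)
theorem set_map_range (n i : Nat) (g : Nat → List Int) (X : List Int) :
    ((List.range n).map g).set i (((List.range n).map g).getD i [] ++ X) =
      (List.range n).map (fun d => g d ++ if d = i then X else []) := by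
  by_cases hi : i < n
  · apply List.ext_getElem
    · simp
    · intro j h1 h2
      rw [List.getElem_set]
      simp only [List.getElem_map, List.getElem_range]
      have hj : j < n := by simpa using h2
      by_cases hij : i = j
      · subst hij
        rw [if_pos rfl, if_pos rfl, List.getD_eq_getElem?_getD]
        simp [hi]
      · rw [if_neg hij, if_neg (by omega)]
        simp
  · rw [List.set_eq_of_length_le (by simpa using hi)]
    apply List.map_congr_left
    intro d hd
    rw [if_neg (by simp at hd; omega)]
    simp

-- one inner loop (one row r scattered over all its columns)
theorem inner_fold_eq (M : List (List (List Int))) (cols n r : Nat) (g : Nat → List Int) :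
    (List.range cols).foldl
      (fun ds c => ds.set (r + c)
        (ds.getD (r + c) [] ++ pvCell M r c))
      ((List.range n).map g) =
    (List.range n).map (fun d => g d ++ if r ≤ d ∧ d < r + cols then pvCell M r (d - r) else []) := by
  induction cols generalizing g with
  | zero =>
    simp only [List.range_zero, List.foldl_nil]
    apply List.map_congr_left
    intro d hd
    rw [if_neg (by omega)]
    simp
  | succ c ih =>
    rw [List.range_succ, List.foldl_append, ih]
    simp only [List.foldl_cons, List.foldl_nil]
    rw [set_map_range]
    apply List.map_congr_left
    intro d hd
    by_cases h1 : d = r + c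
    · rw [if_pos h1, if_neg (by omega), if_pos (by omega)]
      simp [h1]
    · rw [if_neg h1]
      by_cases h2 : r ≤ d ∧ d < r + c
      · rw [if_pos h2, if_pos (by omega)]
        simp
      · rw [if_neg h2, if_neg (by omega)]
        simp

theorem pvDiag_succ (M : List (List (List Int))) (cols d r : Nat) :
    pvDiag M cols d (r + 1) =
      pvDiag M cols d r ++ (if r ≤ d ∧ d < r + cols then pvCell M r (d - r) else []) := by
  unfold pvDiag
  by_cases h : r ≤ d ∧ d < r + cols
  · rw [if_pos h]
    have h1 : min (r + 1) (d + 1) - (d + 1 - cols) = (min r (d + 1) - (d + 1 - cols)) + 1 := by omega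
    have h2 : (d + 1 - cols) + (min r (d + 1) - (d + 1 - cols)) = r := by omega
    rw [h1, List.range'_1_concat, List.flatMap_append, h2]
    simp
  · rw [if_neg h, List.append_nil]
    have : min (r + 1) (d + 1) - (d + 1 - cols) = min r (d + 1) - (d + 1 - cols) := by omega
    rw [this]

-- the whole scatter phase of B
theorem outer_fold_eq (M : List (List (List Int))) (cols n : Nat) :
    ∀ rLim : Nat,
      (List.range rLim).foldl
        (fun ds r => (List.range cols).foldl
          (fun ds c => ds.set (r + c)
            (ds.getD (r + c) [] ++
              pvCellBits (PySem.List.pyGetD (PySem.List.pyGetD M (r : Int) []) (c : Int) [])))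
          ds)
        (List.replicate n []) =
      (List.range n).map (fun d => pvDiag M cols d rLim) := by
  intro rLim
  induction rLim with
  | zero =>
    simp only [List.range_zero, List.foldl_nil]
    apply List.ext_getElem
    · simp
    · intro j h1 h2
      simp [pvDiag, List.getElem_replicate]
  | succ r ih =>
    rw [List.range_succ, List.foldl_append, ih]
    simp only [List.foldl_cons, List.foldl_nil]
    have := inner_fold_eq M cols n r (fun d => pvDiag M cols d r)
    simp only [pvCell] at this
    rw [this]
    apply List.map_congr_left
    intro d hd
    rw [pvDiag_succ]
    simp [pvCell]

-- emission phase shared shape: concatenate buckets, reversing odd-indexed ones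
def pvEmit (s : Int) (l : List (List Int)) : List Int :=
  match l with
  | [] => []
  | b :: bs => (if PySem.Int.mod s 2 = 0 then b else b.reverse) ++ pvEmit (s + 1) bs

theorem foldl_enum_eq_pvEmit (l : List (List Int)) :
    ∀ (s : Int) (acc : List Int),
      (PySem.List.enumerate l s).foldl
        (fun bits db => bits ++ (if PySem.Int.mod db.1 2 = 0 then db.2 else db.2.reverse)) acc =
      acc ++ pvEmit s l := by
  induction l with
  | nil => intro s acc; simp [pvEmit, PySem.List.enumerate]
  | cons b bs ih =>
    intro s acc
    rw [PySem.List.enumerate_cons, List.foldl_cons, ih, pvEmit, List.append_assoc]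

theorem pvEmit_concat (l : List (List Int)) :
    ∀ (s : Int) (b : List Int),
      pvEmit s (l ++ [b]) =
        pvEmit s l ++ (if PySem.Int.mod (s + l.length) 2 = 0 then b else b.reverse) := by
  induction l with
  | nil => intro s b; simp [pvEmit]
  | cons x xs ih =>
    intro s b
    simp only [List.cons_append, pvEmit, ih, List.append_assoc, List.length_cons]
    have : s + 1 + (xs.length : Int) = s + ((xs.length : Int) + 1) := by ring
    rw [this]
    norm_cast

theorem pvEmit_eq_flatMap (f : Nat → List Int) (n : Nat) :
    pvEmit 0 ((List.range n).map f) =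
      (List.range n).flatMap
        (fun (d : Nat) => if PySem.Int.mod (d : Int) 2 = 0 then f d else (f d).reverse) := by
  induction n with
  | zero => simp [pvEmit]
  | succ m ih =>
    rw [List.range_succ, List.map_append, List.flatMap_append]
    simp only [List.map_cons, List.map_nil]
    rw [pvEmit_concat, ih]
    simp

-- master equivalence, for every input
theorem ports_agree (M : List (List (List Int))) :
    diagonal_traverse_lsb M = diagonal_traverse_lsb_alt M := by
  unfold diagonal_traverse_lsb diagonal_traverse_lsb_alt
  simp only []
  set N := M.length with hN
  set cols := (PySem.List.pyGetD M 0 []).length with hcols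
  -- B side: scatter phase, then emission phase
  rw [outer_fold_eq M cols (N + cols - 1), foldl_enum_eq_pvEmit, List.nil_append,
    pvEmit_eq_flatMap]
  -- A side: each loop body appends the bucket pvDiag of its diagonal
  have hbody : ∀ (bits : List Int), ∀ d ∈ PySem.List.pyRange 0 ((N : Int) + cols - 1) 1,
      (let rc : Int × Int := if d < (cols : Int) then (0, d) else (d - cols + 1, (cols : Int) - 1)
       let diagonal := pvWalkA M (N : Int) rc.1 rc.2 []
       if PySem.Int.mod d 2 = 0 then bits ++ diagonal else bits ++ diagonal.reverse) =
      bits ++ (if PySem.Int.mod d 2 = 0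
               then pvDiag M cols d.toNat N
               else (pvDiag M cols d.toNat N).reverse) := by
    intro bits d hd
    have hd0 : 0 ≤ d := (PySem.List.mem_pyRange_one.mp hd).1
    set k : Nat := d.toNat + 1 - cols with hk
    have h1 : (if d < (cols : Int) then ((0 : Int), d) else (d - cols + 1, (cols : Int) - 1)) =
        ((k : Int), (d.toNat : Int) - (k : Int)) := by
      split <;> simp only [Prod.mk.injEq] <;> omega
    have h2 : pvWalkA M (↑N) (↑k) ((d.toNat : Int) - (k : Int)) [] = pvDiag M cols d.toNat N := by
      rw [hN, pvWalkA_eq M d.toNat (min M.length (d.toNat + 1) - k) k [] rfl]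
      rw [pvDiag, List.nil_append, hk]
    simp only [h1, h2]
    split <;> rfl
  rw [PySem.List.foldl_congr_mem _ _ _ [] hbody, PySem.List.foldl_append_eq_flatMap,
    List.nil_append, PySem.List.pyRange_one]
  have hNd : (((N : Int) + cols - 1) - 0).toNat = N + cols - 1 := by omega
  rw [List.flatMap_map, hNd]
  apply List.flatMap_congr
  intro k _
  simp

-- ===== VERDICT (by name: the statement is the Claim_ definition above) =====
theorem diagonal_traverse_lsb_spec : Claim_equal_diagonal_traverse_lsb := by
  intro M _ _
  unfold Spec_diagonal_traverse_lsb
  exact ports_agree M
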